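-- pv_equiv track=rewrite | github.com/miyakawa2449/portfolio | access_log_analyzer.py | _is_admin_path
-- ===== SOURCE A (Python) =====
-- def _is_admin_path(path):
--     """
--     パスが管理画面へのアクセスかどうかを判定
--     """
--     if not path or path == 'unknown':
--         return False
--
--     admin_patterns = [
--         '/admin', '/management-panel', '/wp-admin', '/administrator',
--         '/login', '/auth', '/dashboard', '/panel'
--     ]
--
--     return any(pattern in path.lower() for pattern in admin_patterns)
-- ===== SOURCE B (Python) =====
-- _ADMIN_TAILS = ('admin', 'management-panel', 'wp-admin', 'administrator',
--                 'login', 'auth', 'dashboard', 'panel')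
--
-- def _is_admin_path(path):
--     if not path or path == 'unknown':
--         return False
--     p = path.lower()
--     for i, ch in enumerate(p):
--         if ch == '/':
--             rest = p[i + 1:]
--             if any(rest.startswith(t) for t in _ADMIN_TAILS):
--                 return True
--     return False
-- ===== Notes on version B (the rewrite author's own statement) =====
-- stated objective: alternative
-- what changed: Instead of running eight independent whole-string substring searches, one per admin pattern, B makes a single left-to-right scan over the lowercased path and, only at slash characters, tests whether one of the eight pattern tails (the patterns minus their leading slash) is a prefix of the remainder.
import Mathlib
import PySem

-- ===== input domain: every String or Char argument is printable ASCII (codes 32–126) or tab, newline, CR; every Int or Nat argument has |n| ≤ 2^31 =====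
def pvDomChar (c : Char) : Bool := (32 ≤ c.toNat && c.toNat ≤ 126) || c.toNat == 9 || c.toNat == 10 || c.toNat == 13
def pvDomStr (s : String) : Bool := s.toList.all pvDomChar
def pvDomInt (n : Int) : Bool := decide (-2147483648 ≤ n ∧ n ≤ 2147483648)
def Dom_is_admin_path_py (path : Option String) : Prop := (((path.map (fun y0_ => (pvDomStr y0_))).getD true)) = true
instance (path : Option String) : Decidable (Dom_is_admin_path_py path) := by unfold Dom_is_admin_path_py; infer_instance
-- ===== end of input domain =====

-- B replaces A's eight whole-string substring searches by one left-to-right scan that tests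
-- the eight pattern tails as prefixes only at '/' characters (objective: alternative).

-- ===== PORT A =====
def pvAdminPatterns : List String :=
  ["/admin", "/management-panel", "/wp-admin", "/administrator",
   "/login", "/auth", "/dashboard", "/panel"]

def is_admin_path_py (path : Option String) : Bool :=
  match path with
  | none => false
  | some s =>
    if s = "" || s = "unknown" then false
    else pvAdminPatterns.any (fun pat => PySem.Str.isIn pat (PySem.Str.lower s))

-- ===== PORT B =====
def pvAdminTails : List (List Char) :=
  ["admin".toList, "management-panel".toList, "wp-admin".toList, "administrator".toList,
   "login".toList, "auth".toList, "dashboard".toList, "panel".toList]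

def pvScan : List Char → Bool
  | [] => false
  | c :: rest =>
    ((c == '/') && pvAdminTails.any (fun t => PySem.Chars.startswith rest t)) || pvScan rest

def is_admin_path_py_alt (path : Option String) : Bool :=
  match path with
  | none => false
  | some s =>
    if s = "" || s = "unknown" then false
    else pvScan (PySem.Str.lower s).toList

-- ===== PRECONDITION & SPEC =====
def Spec_is_admin_path_py (path : Option String) (out : Bool) : Prop := out = is_admin_path_py_alt path
instance (path : Option String) (out : Bool) : Decidable (Spec_is_admin_path_py path out) := by unfold Spec_is_admin_path_py; infer_instance

-- ===== CLAIM (what is proved, stated in full; the proofs are below) =====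
def Claim_equal_is_admin_path_py : Prop := ∀ (path : Option String), Dom_is_admin_path_py path → Spec_is_admin_path_py path (is_admin_path_py path)

-- ===== LEMMAS AND PROOFS =====

lemma pv_isIn_cons (pat : List Char) (c : Char) (cs : List Char) :
    PySem.Chars.isIn pat (c :: cs)
      = (PySem.Chars.startswith (c :: cs) pat || PySem.Chars.isIn pat cs) := by
  apply Bool.eq_iff_iff.mpr
  simp [PySem.Chars.isIn_iff_infix, PySem.Chars.startswith_iff, List.infix_cons_iff]

lemma pv_sw_cons (t : List Char) (c : Char) (cs : List Char) :
    PySem.Chars.startswith (c :: cs) ('/' :: t)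
      = ((c == '/') && PySem.Chars.startswith cs t) := by
  apply Bool.eq_iff_iff.mpr
  simp only [PySem.Chars.startswith_iff, Bool.and_eq_true, beq_iff_eq, List.cons_prefix_cons]
  constructor <;> rintro ⟨h1, h2⟩ <;> exact ⟨h1.symm, h2⟩

lemma pv_scan_eq (cs : List Char) :
    pvScan cs
      = (pvAdminTails.map (fun t => '/' :: t)).any (fun pat => PySem.Chars.isIn pat cs) := by
  induction cs with
  | nil => decide
  | cons c cs ih =>
    simp only [pvScan, ih, pvAdminTails, List.map_cons, List.map_nil,
      List.any_cons, List.any_nil, pv_isIn_cons, pv_sw_cons]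
    cases c == '/' <;> (apply Bool.eq_iff_iff.mpr; simp; try tauto)

-- ===== VERDICT (by name: the statement is the Claim_ definition above) =====
theorem is_admin_path_py_spec : Claim_equal_is_admin_path_py := by
  intro path _
  unfold Spec_is_admin_path_py is_admin_path_py is_admin_path_py_alt
  match path with
  | none => rfl
  | some s =>
    simp only []
    split
    · rfl
    · rw [pv_scan_eq]
      simp [pvAdminPatterns, pvAdminTails, PySem.Str.isIn]
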